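-- pv_equiv track=rewrite | github.com/Rebas9512/Trileaf | scripts/models_runtime.py | _merge_case_insensitive_headers
-- ===== SOURCE A (Python) =====
-- from typing import Any, Dict, List, Optional
--
-- def _merge_case_insensitive_headers(
--     base: Dict[str, str],
--     override: Dict[str, str],
-- ) -> Dict[str, str]:
--     merged = dict(base)
--     for name, value in override.items():
--         target = name.lower()
--         for existing in list(merged.keys()):
--             if existing.lower() == target:
--                 del merged[existing]
--         merged[name] = value
--     return merged
-- ===== SOURCE B (Python) =====
-- def _merge_case_insensitive_headers(base, override):
--     # One backward pass over override dedupes it case-insensitively (last wins),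
--     # then base is filtered once against the collected lowercased names.
--     canon_rev = []
--     seen = set()
--     for name, value in reversed(list(override.items())):
--         low = name.lower()
--         if low not in seen:
--             seen.add(low)
--             canon_rev.append((name, value))
--     merged = {name: value for name, value in base.items()
--               if name.lower() not in seen}
--     for name, value in reversed(canon_rev):
--         merged[name] = value
--     return merged
-- ===== Notes on version B (the rewrite author's own statement) =====
-- stated objective: faster
-- what changed: A rescans and deletes from the merged dict for every override entry; B makes one backward pass over override with a seen-set to dedupe it case-insensitively (last wins), filters base once against the collected lowercased names, then appends the canonical override entries.
import Mathlib
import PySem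

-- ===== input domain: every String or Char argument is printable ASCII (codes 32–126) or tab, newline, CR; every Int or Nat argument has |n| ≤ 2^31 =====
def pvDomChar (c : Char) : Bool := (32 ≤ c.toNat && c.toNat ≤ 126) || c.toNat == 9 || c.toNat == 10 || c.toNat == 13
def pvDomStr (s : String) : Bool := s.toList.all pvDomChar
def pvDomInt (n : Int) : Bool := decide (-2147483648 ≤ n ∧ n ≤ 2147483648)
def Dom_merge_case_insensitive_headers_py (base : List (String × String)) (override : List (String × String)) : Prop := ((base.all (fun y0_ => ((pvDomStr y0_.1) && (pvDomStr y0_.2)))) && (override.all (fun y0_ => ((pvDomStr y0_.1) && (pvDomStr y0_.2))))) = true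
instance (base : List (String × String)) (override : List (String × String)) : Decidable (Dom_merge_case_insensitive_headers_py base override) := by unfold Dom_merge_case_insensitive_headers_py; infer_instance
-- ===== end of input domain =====

-- B dedupes override case-insensitively in one backward pass with a seen-set, filters base once, appends; A rescans and deletes per override entry.

-- ===== PORT A =====
def merge_case_insensitive_headers_py (base : List (String × String)) (override : List (String × String)) : List (String × String) :=
  let merged := PySem.Dict.ofList base
  let merged := (PySem.Dict.ofList override).items.foldl
    (fun (merged : PySem.Dict String String) nv =>
      let target := PySem.Str.lower nv.1
      let merged := merged.keys.foldl
        (fun m existing => if PySem.Str.lower existing == target then m.erase existing else m)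
        merged
      merged.insert nv.1 nv.2)
    merged
  merged.items

-- ===== PORT B =====
-- body of B's backward-pass loop (low = name.lower(); seen-test, append, add)
def stepB (acc : List (String × String) × PySem.Set String) (nv : String × String) :
    List (String × String) × PySem.Set String :=
  if PySem.Set.contains acc.2 (PySem.Str.lower nv.1) then acc
  else (acc.1 ++ [nv], PySem.Set.add acc.2 (PySem.Str.lower nv.1))

def merge_case_insensitive_headers_py_alt (base : List (String × String)) (override : List (String × String)) : List (String × String) :=
  let items := (PySem.Dict.ofList override).items
  let cs := items.reverse.foldl stepB ([], PySem.Set.empty)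
  let merged := ((PySem.Dict.ofList base).items.filter
      (fun nv => !(PySem.Set.contains cs.2 (PySem.Str.lower nv.1)))).foldl
    (fun (d : PySem.Dict String String) nv => d.insert nv.1 nv.2) PySem.Dict.empty
  let merged := cs.1.reverse.foldl
    (fun (d : PySem.Dict String String) nv => d.insert nv.1 nv.2) merged
  merged.items

-- ===== PRECONDITION & SPEC =====
def Spec_merge_case_insensitive_headers_py (base : List (String × String)) (override : List (String × String)) (out : List (String × String)) : Prop := out = merge_case_insensitive_headers_py_alt base override
instance (base : List (String × String)) (override : List (String × String)) (out : List (String × String)) : Decidable (Spec_merge_case_insensitive_headers_py base override out) := by unfold Spec_merge_case_insensitive_headers_py; infer_instance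

-- ===== CLAIM (what is proved, stated in full; the proofs are below) =====
def Claim_equal_merge_case_insensitive_headers_py : Prop := ∀ (base : List (String × String)) (override : List (String × String)), Dom_merge_case_insensitive_headers_py base override → Spec_merge_case_insensitive_headers_py base override (merge_case_insensitive_headers_py base override)

-- ===== LEMMAS AND PROOFS =====

-- lowercased key of a pair
def lowK (nv : String × String) : String := PySem.Str.lower nv.1

-- override deduped case-insensitively, last occurrence wins (s = extra forbidden lowers)
def canonW (s : PySem.Set String) : List (String × String) → List (String × String)
  | [] => []
  | nv :: l =>
      if ((l.map lowK).contains (lowK nv) || PySem.Set.contains s (lowK nv)) then canonW s l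
      else nv :: canonW s l

-- the kept items of B's backward pass, in processing order
def keepB (s : PySem.Set String) : List (String × String) → List (String × String)
  | [] => []
  | nv :: l =>
      if PySem.Set.contains s (lowK nv) then keepB s l
      else nv :: keepB (PySem.Set.add s (lowK nv)) l

theorem canonW_sublist (s : PySem.Set String) (l : List (String × String)) :
    (canonW s l).Sublist l := by
  induction l with
  | nil => simp [canonW]
  | cons nv l ih =>
    simp only [canonW]
    split
    · exact ih.cons _
    · exact ih.cons₂ _

-- A's inner snapshot loop erases exactly the items whose key is in ks with matching lower
theorem eraseLoop_items (t : String) (ks : List String) (m : PySem.Dict String String) :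
    (ks.foldl (fun m existing => if PySem.Str.lower existing == t then m.erase existing else m) m).items
      = m.items.filter (fun p => !(ks.contains p.1 && (PySem.Str.lower p.1 == t))) := by
  induction ks generalizing m with
  | nil => simp
  | cons k ks ih =>
    simp only [List.foldl_cons]
    by_cases hk : PySem.Str.lower k = t
    · rw [if_pos (by simp [hk])]
      rw [ih]
      show (PySem.Dict.mk _).items.filter _ = _
      simp only [List.filter_filter]
      apply List.filter_congr
      intro p _
      by_cases hp : p.1 = k
      · simp [hp, hk]
      · simp [hp]
    · rw [if_neg (by simp [hk])]
      rw [ih]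
      apply List.filter_congr
      intro p _
      by_cases hp : p.1 = k
      · simp [hp, hk]
      · simp [hp]

-- A's body for one override entry, on the items list
theorem stepA_items (m : PySem.Dict String String) (nv : String × String) :
    ((m.keys.foldl (fun m existing => if PySem.Str.lower existing == PySem.Str.lower nv.1 then m.erase existing else m) m).insert nv.1 nv.2).items
      = m.items.filter (fun p => !(PySem.Str.lower p.1 == PySem.Str.lower nv.1)) ++ [nv] := by
  rw [PySem.Dict.items_insert_of_not_contains, eraseLoop_items]
  · congr 1
    apply List.filter_congr
    intro p hp
    have : p.1 ∈ m.keys := List.mem_map_of_mem hp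
    simp [List.contains_iff_mem, this]
  · simp only [PySem.Dict.contains]
    rw [eraseLoop_items]
    simp only [List.any_filter, List.any_eq_false]
    intro p hp
    have hk : p.1 ∈ m.keys := List.mem_map_of_mem hp
    by_cases h : p.1 = nv.1
    · simp [h, List.contains_iff_mem, h ▸ hk]
    · simp [h]

-- A's main loop in closed form
theorem foldA_items (ov : List (String × String)) (m : PySem.Dict String String) :
    (ov.foldl
      (fun (merged : PySem.Dict String String) nv =>
        let target := PySem.Str.lower nv.1
        let merged := merged.keys.foldl
          (fun m existing => if PySem.Str.lower existing == target then m.erase existing else m)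
          merged
        merged.insert nv.1 nv.2) m).items
      = m.items.filter (fun p => !((ov.map lowK).contains (PySem.Str.lower p.1))) ++ canonW PySem.Set.empty ov := by
  induction ov generalizing m with
  | nil => simp [canonW]
  | cons nv ov ih =>
    simp only [List.foldl_cons]
    rw [ih]
    show (((m.keys.foldl _ m).insert nv.1 nv.2).items).filter _ ++ _ = _
    rw [stepA_items, List.filter_append, List.filter_filter]
    have hm : m.items.filter
        (fun p => !((ov.map lowK).contains (PySem.Str.lower p.1)) && !(PySem.Str.lower p.1 == PySem.Str.lower nv.1))
        = m.items.filter (fun p => !(((nv :: ov).map lowK).contains (PySem.Str.lower p.1))) := by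
      apply List.filter_congr
      intro p _
      simp [lowK, Bool.not_or, Bool.and_comm]
    rw [hm]
    have he : PySem.Set.contains PySem.Set.empty (lowK nv) = false := rfl
    by_cases h : (PySem.Str.lower nv.1) ∈ ov.map lowK
    · simp [canonW, lowK, he, List.contains_iff_mem, h, List.filter_cons, List.append_assoc]
    · simp [canonW, lowK, he, List.contains_iff_mem, h, List.filter_cons, List.append_assoc]

-- keepB over an append splits, carrying the updated seen-set
theorem keepB_append (a b : List (String × String)) (s : PySem.Set String) :
    keepB s (a ++ b) = keepB s a ++ keepB (PySem.Set.update s (a.map lowK)) b := by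
  induction a generalizing s with
  | nil => simp [keepB, PySem.Set.update_nil]
  | cons nv a ih =>
    simp only [List.cons_append, keepB, List.map_cons, PySem.Set.update_cons]
    by_cases hm : lowK nv ∈ s
    · simp [hm, ih]
    · simp [hm, ih, List.cons_append]

-- B's backward-pass fold in closed form
theorem foldB_closed (l : List (String × String)) (c0 : List (String × String)) (s : PySem.Set String) :
    l.foldl stepB (c0, s) = (c0 ++ keepB s l, PySem.Set.update s (l.map lowK)) := by
  induction l generalizing c0 s with
  | nil => simp [keepB, PySem.Set.update_nil]
  | cons nv l ih =>
    simp only [List.foldl_cons, stepB, keepB, List.map_cons, PySem.Set.update_cons]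
    by_cases hm : PySem.Str.lower nv.1 ∈ s
    · simp [hm, ih, lowK]
    · simp [hm, ih, lowK, List.append_assoc]

theorem contains_update_bool (s : PySem.Set String) (xs : List String) (x : String) :
    PySem.Set.contains (PySem.Set.update s xs) x = (PySem.Set.contains s x || xs.contains x) := by
  rw [Bool.eq_iff_iff]
  simp [PySem.Set.mem_update, PySem.Set.contains_eq_listContains]

-- keepB over the reversed list is canonW reversed
theorem keepB_reverse (l : List (String × String)) (s : PySem.Set String) :
    keepB s l.reverse = (canonW s l).reverse := by
  induction l generalizing s with
  | nil => simp [keepB, canonW]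
  | cons nv l ih =>
    rw [List.reverse_cons, keepB_append, ih]
    have hc : PySem.Set.contains (PySem.Set.update s (List.map lowK l.reverse)) (lowK nv)
        = ((l.map lowK).contains (lowK nv) || PySem.Set.contains s (lowK nv)) := by
      rw [Bool.eq_iff_iff, List.map_reverse]
      simp only [PySem.Set.contains_eq_listContains, List.contains_iff_mem, Bool.or_eq_true,
        PySem.Set.mem_update, List.mem_reverse]
      tauto
    simp only [keepB, canonW]
    rw [hc]
    split
    · simp
    · simp

-- lowercased keys of canonW are distinct
theorem nodup_lows_canonW (s : PySem.Set String) (l : List (String × String)) :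
    ((canonW s l).map lowK).Nodup := by
  induction l with
  | nil => simp [canonW]
  | cons nv l ih =>
    simp only [canonW]
    split
    · exact ih
    · rename_i h
      simp only [List.map_cons, List.nodup_cons]
      refine ⟨fun hmem => ?_, ih⟩
      have : lowK nv ∈ l.map lowK :=
        ((canonW_sublist s l).map lowK).mem hmem
      simp only [Bool.or_eq_true, not_or, List.contains_iff_mem] at h
      exact absurd this (by simpa using h.1)

-- keys of canonW are distinct
theorem nodup_keys_canonW (s : PySem.Set String) (l : List (String × String)) :
    ((canonW s l).map Prod.fst).Nodup := by
  have h := nodup_lows_canonW s l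
  have : (canonW s l).map lowK = ((canonW s l).map Prod.fst).map PySem.Str.lower := by
    simp [lowK, Function.comp]
  rw [this] at h
  exact h.of_map _

-- a fold of fresh inserts from a dict appends the pairs
theorem foldl_insert_pairs (l : List (String × String)) (d : PySem.Dict String String)
    (hfresh : ∀ a ∈ l, d.contains a.1 = false) (hnd : (l.map Prod.fst).Nodup) :
    (l.foldl (fun (d : PySem.Dict String String) nv => d.insert nv.1 nv.2) d).items
      = d.items ++ l := by
  have := PySem.Dict.items_foldl_insert_fresh (l := l) (d := d)
    (k := Prod.fst) (v := Prod.snd) hfresh hnd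
  simpa using this

-- ===== VERDICT (by name: the statement is the Claim_ definition above) =====
theorem merge_case_insensitive_headers_py_spec : Claim_equal_merge_case_insensitive_headers_py := by
  intro base override _
  show merge_case_insensitive_headers_py base override = merge_case_insensitive_headers_py_alt base override
  unfold merge_case_insensitive_headers_py merge_case_insensitive_headers_py_alt
  dsimp only
  rw [foldA_items, foldB_closed]
  simp only [List.nil_append, keepB_reverse, List.reverse_reverse]
  set items := (PySem.Dict.ofList override).items with hitems
  set F := (PySem.Dict.ofList base).items.filter
      (fun p => !((items.map lowK).contains (PySem.Str.lower p.1))) with hF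
  have hFB : (PySem.Dict.ofList base).items.filter
      (fun nv => !(PySem.Set.contains (PySem.Set.update PySem.Set.empty (items.reverse.map lowK)) (PySem.Str.lower nv.1))) = F := by
    apply List.filter_congr
    intro p _
    rw [contains_update_bool]
    congr 1
    rw [Bool.eq_iff_iff]
    simp [PySem.Set.contains_eq_listContains]
  rw [hFB]
  have hndF : (F.map Prod.fst).Nodup := by
    have h1 : (PySem.Dict.ofList base).keys.Nodup := PySem.Dict.nodup_keys_ofList base
    exact ((List.filter_sublist).map Prod.fst).nodup h1
  have h1 : ((F.foldl (fun (d : PySem.Dict String String) nv => d.insert nv.1 nv.2) PySem.Dict.empty)).items = F := by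
    rw [foldl_insert_pairs]
    · rfl
    · intro a _; rfl
    · exact hndF
  have h2 : (((canonW PySem.Set.empty items).foldl
      (fun (d : PySem.Dict String String) nv => d.insert nv.1 nv.2)
      (F.foldl (fun (d : PySem.Dict String String) nv => d.insert nv.1 nv.2) PySem.Dict.empty))).items
      = F ++ canonW PySem.Set.empty items := by
    rw [foldl_insert_pairs]
    · rw [h1]
    · intro a ha
      show ((F.foldl (fun (d : PySem.Dict String String) nv => d.insert nv.1 nv.2) PySem.Dict.empty).items.any (fun p => p.1 == a.1)) = false
      rw [h1, List.any_eq_false]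
      intro p hp
      have hai : a ∈ items := (canonW_sublist _ _).mem ha
      intro hbeq
      have heq : p.1 = a.1 := by simpa using hbeq
      have hb := (List.mem_filter.mp (hF ▸ hp)).2
      rw [heq] at hb
      have hc2 : (List.map lowK items).contains (PySem.Str.lower a.1) = true :=
        List.contains_iff_mem.mpr (by simpa [lowK] using List.mem_map_of_mem (f := lowK) hai)
      rw [hc2] at hb
      simp at hb
    · exact nodup_keys_canonW _ _
  exact h2.symm
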